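-- pv_equiv track=rewrite | github.com/Hi-Timofey/CandyDeliveryAppAPI | data/couriers.py | validate_regions
-- ===== SOURCE A (Python) =====
-- def validate_regions(regions: list) -> bool:
--     if not isinstance(regions, list):
--         return False
--     for r in regions:
--         try:
--             if isinstance(r, bool) or not isinstance(r, int):
--                 return False
--             if r <= 0:
--                 return False
--             if regions.count(r) > 1:
--                 return False
--         except TypeError as te:
--             return False
--
--     return True
-- ===== SOURCE B (Python) =====
-- def validate_regions(regions: list) -> bool:
--     if not isinstance(regions, list):
--         return False
--     # type pass first (sorting mixed/unhashable types would raise)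
--     if not all(isinstance(r, int) and not isinstance(r, bool) for r in regions):
--         return False
--     s = sorted(regions)
--     if s and s[0] <= 0:
--         return False
--     return all(a < b for a, b in zip(s, s[1:]))
-- ===== Notes on version B (the rewrite author's own statement) =====
-- stated objective: faster
-- what changed: Sort the list once, then check positivity via the sorted minimum and detect duplicates by an adjacent strict-increase scan, instead of A's per-element regions.count rescan.
import Mathlib
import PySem

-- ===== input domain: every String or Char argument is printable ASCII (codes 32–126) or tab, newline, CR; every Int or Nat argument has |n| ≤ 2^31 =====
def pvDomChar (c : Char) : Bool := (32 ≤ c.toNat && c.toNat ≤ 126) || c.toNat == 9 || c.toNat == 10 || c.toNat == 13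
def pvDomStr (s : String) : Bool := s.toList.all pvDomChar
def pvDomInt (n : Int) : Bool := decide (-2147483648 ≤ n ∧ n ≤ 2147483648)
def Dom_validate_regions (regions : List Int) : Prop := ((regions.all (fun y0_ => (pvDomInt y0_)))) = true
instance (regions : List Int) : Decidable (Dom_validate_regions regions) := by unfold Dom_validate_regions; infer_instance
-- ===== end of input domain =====

-- B sorts once and checks positivity via the sorted minimum plus duplicates by an
-- adjacent strict-increase scan, replacing A's per-element regions.count rescan (faster).

-- ===== PORT A =====
-- the isinstance(regions, list) / isinstance(r, int) / isinstance(r, bool) checks are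
-- trivially resolved by the List Int type and are dropped; the body never raises TypeError.
def validate_regions_go (regions : List Int) : List Int → Bool
  | [] => true
  | r :: rest =>
    if r ≤ 0 then false
    else if 1 < regions.count r then false
    else validate_regions_go regions rest

def validate_regions (regions : List Int) : Bool :=
  validate_regions_go regions regions

-- ===== PORT B =====
def validate_regions_alt (regions : List Int) : Bool :=
  let s := PySem.List.sorted regions (fun x => x) false
  match s with
  | [] => true
  | r0 :: tail =>
    if r0 ≤ 0 then false
    else (s.zip tail).all (fun ab => decide (ab.1 < ab.2))

-- ===== PRECONDITION & SPEC =====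
def Spec_validate_regions (regions : List Int) (out : Bool) : Prop := out = validate_regions_alt regions
instance (regions : List Int) (out : Bool) : Decidable (Spec_validate_regions regions out) := by unfold Spec_validate_regions; infer_instance

-- ===== CLAIM =====
def Claim_equal_validate_regions : Prop := ∀ (regions : List Int), Dom_validate_regions regions → Spec_validate_regions regions (validate_regions regions)

-- ===== LEMMAS AND PROOFS =====

theorem validate_regions_go_eq_all (regions rest : List Int) :
    validate_regions_go regions rest
      = rest.all (fun r => decide (0 < r) && decide (regions.count r ≤ 1)) := by
  induction rest with
  | nil => rfl
  | cons r rest ih =>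
    simp only [validate_regions_go, List.all_cons, ih]
    by_cases h1 : r ≤ 0
    · simp [h1, show ¬ (0 < r) by omega]
    · by_cases h2 : 1 < regions.count r
      · simp [h1, h2, show (0 < r) by omega, show ¬ (regions.count r ≤ 1) by omega]
      · simp [h1, h2, show (0 < r) by omega, show regions.count r ≤ 1 by omega]

-- the adjacent scan on a sorted (≤-pairwise) list is exactly Nodup
theorem zip_tail_all_lt_iff (s : List Int) (hs : s.Pairwise (· ≤ ·)) :
    ((s.zip s.tail).all (fun ab => decide (ab.1 < ab.2)) = true) ↔ s.Nodup := by
  induction s with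
  | nil => simp
  | cons a t ih =>
    have ht : t.Pairwise (· ≤ ·) := hs.of_cons
    cases t with
    | nil => simp
    | cons b u =>
      have hab : a ≤ b := (List.pairwise_cons.mp hs).1 b (by simp)
      have ihu := ih ht
      simp only [List.tail_cons, List.zip_cons_cons, List.all_cons, Bool.and_eq_true,
        decide_eq_true_eq] at ihu ⊢
      constructor
      · rintro ⟨hlt, hrest⟩
        have hnd : (b :: u).Nodup := ihu.mp hrest
        refine List.nodup_cons.mpr ⟨?_, hnd⟩
        intro hmem
        rcases List.mem_cons.mp hmem with h | h
        · omega
        · have : b ≤ a := by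
            have := (List.pairwise_cons.mp ht).1 a h
            exact this
          omega
      · intro hnd
        rcases List.nodup_cons.mp hnd with ⟨hna, hnd'⟩
        refine ⟨?_, ihu.mpr hnd'⟩
        have : a ≠ b := fun h => hna (by simp [h])
        omega

-- ===== VERDICT =====
theorem validate_regions_spec : Claim_equal_validate_regions := by
  intro regions _
  unfold Spec_validate_regions validate_regions validate_regions_alt
  rw [validate_regions_go_eq_all, Bool.eq_iff_iff]
  have hperm : (PySem.List.sorted regions (fun x => x) false).Perm regions :=
    PySem.List.sorted_perm regions (fun x => x) false
  have hpw : (PySem.List.sorted regions (fun x => x) false).Pairwise (· ≤ ·) :=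
    PySem.List.sorted_pairwise regions (fun x => x)
  simp only [List.all_eq_true, Bool.and_eq_true, decide_eq_true_eq]
  cases hs : PySem.List.sorted regions (fun x => x) false with
  | nil =>
    have : regions = [] := by
      have := hperm; rw [hs] at this
      exact (List.Perm.nil_eq this).symm
    simp [this]
  | cons r0 tail =>
    rw [hs] at hperm hpw
    have hmin : ∀ y ∈ regions, r0 ≤ y :=
      PySem.List.key_head_sorted_le regions (fun x => x) hs
    by_cases h0 : r0 ≤ 0
    · simp only [if_pos h0, Bool.false_eq_true, iff_false]
      intro hall
      have hr0 : r0 ∈ regions := hperm.mem_iff.mp (by simp)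
      have := (hall r0 hr0).1
      omega
    · simp only [if_neg h0]
      have hnod : ((((r0 :: tail).zip tail).all (fun ab => decide (ab.1 < ab.2))) = true)
          ↔ (r0 :: tail).Nodup := by
        have := zip_tail_all_lt_iff (r0 :: tail) hpw
        simpa using this
      rw [Bool.eq_iff_iff] at *
      constructor
      · intro hall
        apply hnod.mpr
        rw [List.nodup_iff_count_le_one]
        intro a
        by_cases ha : a ∈ regions
        · have := (hall a ha).2
          calc (r0 :: tail).count a = regions.count a := hperm.count_eq a
            _ ≤ 1 := this
        · have : a ∉ (r0 :: tail) := fun h => ha (hperm.mem_iff.mp h)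
          simp [List.count_eq_zero_of_not_mem this]
      · intro hz r hr
        have hnd : (r0 :: tail).Nodup := hnod.mp hz
        have hcount := (List.nodup_iff_count_le_one.mp hnd) r
        rw [hperm.count_eq r] at hcount
        refine ⟨?_, hcount⟩
        have := hmin r hr
        omega
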